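-- pv_equiv track=rewrite | github.com/nlg/advent_of_code_2023 | day1/common.py | transform
-- ===== SOURCE A (Python) =====
-- words_to_numbers = {
--     'one' : '1',
--     'two' : '2',
--     'three' : '3',
--     'four' : '4',
--     'five' : '5',
--     'six' : '6',
--     'seven' : '7',
--     'eight' : '8',
--     'nine' : '9',
-- }
--
-- def parse_word(s):
--     temp = ""
--     for c in s:
--         temp = temp + c
--         num = words_to_numbers.get(temp)
--         if num != None:
--             return num
--
-- def transform(d, s):
--     """
--     'xtwone3four' -> '234'
--     """
--     new_str = ""
--     for index, c in enumerate(s):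
--         if c.isnumeric():
--             new_str = new_str + c
--             continue
--         word_number = parse_word(s[index:])
--         if word_number != None:
--             new_str = new_str + word_number
--     return new_str
-- ===== SOURCE B (Python) =====
-- WORDS = [("one", "1"), ("two", "2"), ("three", "3"), ("four", "4"),
--          ("five", "5"), ("six", "6"), ("seven", "7"), ("eight", "8"),
--          ("nine", "9")]
--
-- def transform(d, s):
--     """
--     'xtwone3four' -> '234'
--     """
--     # collect (position, digit) hits: digit characters, then every occurrence
--     # of each spelled-out word; positions are unique, so sorting by position
--     # reconstructs the left-to-right reading.
--     hits = [(i, c) for i, c in enumerate(s) if c.isdigit()]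
--     for w, n in WORDS:
--         hits.extend((i, n) for i in range(len(s)) if s.startswith(w, i))
--     hits.sort(key=lambda t: t[0])
--     return "".join(v for _, v in hits)
-- ===== Notes on version B (the rewrite author's own statement) =====
-- stated objective: faster
-- what changed: Instead of A's position-by-position scan that grows an unbounded prefix of each remaining suffix through dict lookups, B gathers all digit positions and all occurrences of each of the nine fixed words in separate bounded passes, sorts the (position, digit) hits, and joins them.
import Mathlib
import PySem

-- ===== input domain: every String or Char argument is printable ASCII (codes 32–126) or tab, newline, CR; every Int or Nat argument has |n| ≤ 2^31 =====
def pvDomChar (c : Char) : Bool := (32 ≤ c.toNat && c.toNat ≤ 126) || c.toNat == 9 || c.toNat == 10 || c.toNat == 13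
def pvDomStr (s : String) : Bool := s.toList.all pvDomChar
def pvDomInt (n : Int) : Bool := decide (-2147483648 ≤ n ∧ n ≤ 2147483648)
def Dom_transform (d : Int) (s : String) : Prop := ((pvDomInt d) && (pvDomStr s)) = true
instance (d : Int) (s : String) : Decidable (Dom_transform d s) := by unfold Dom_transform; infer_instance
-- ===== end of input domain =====

-- B replaces A's position-by-position scan (which grows an unbounded prefix of each remaining
-- suffix through dict lookups) by separate bounded passes: collect all digit positions and all
-- occurrences of each of the nine fixed words, sort the hits by position, join (objective: faster).

-- ===== PORT A =====
-- strings are modeled as List Char (PySem.Chars); c.isnumeric() = PySem.Chars.isdigit, exact on the printable-ASCII domain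
def wordsToNumbers : PySem.Dict (List Char) (List Char) :=
  PySem.Dict.ofList
    [ (['o','n','e'], ['1']), (['t','w','o'], ['2']), (['t','h','r','e','e'], ['3'])
    , (['f','o','u','r'], ['4']), (['f','i','v','e'], ['5']), (['s','i','x'], ['6'])
    , (['s','e','v','e','n'], ['7']), (['e','i','g','h','t'], ['8']), (['n','i','n','e'], ['9']) ]

-- the 'for c in s' loop of parse_word, carrying temp
def parseWordGo (temp : List Char) (rest : List Char) : Option (List Char) :=
  match rest with
  | [] => none
  | c :: cs =>
    let t := temp ++ [c]
    match wordsToNumbers.get? t with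
    | some num => some num
    | none => parseWordGo t cs

def parseWord (l : List Char) : Option (List Char) := parseWordGo [] l

-- the 'for index, c in enumerate(s)' loop; s[index:] is exactly the suffix still to be processed,
-- so the loop is carried as a recursion on that suffix with the accumulator new_str
def transformGo (acc : List Char) (rest : List Char) : List Char :=
  match rest with
  | [] => acc
  | c :: cs =>
    if PySem.Chars.isdigit c then transformGo (acc ++ [c]) cs
    else
      match parseWord (c :: cs) with
      | some num => transformGo (acc ++ num) cs
      | none => transformGo acc cs

def transform (d : Int) (s : String) : String := String.mk (transformGo [] s.toList)

-- ===== PORT B =====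
def wordList : List (List Char × List Char) :=
  [ (['o','n','e'], ['1']), (['t','w','o'], ['2']), (['t','h','r','e','e'], ['3'])
  , (['f','o','u','r'], ['4']), (['f','i','v','e'], ['5']), (['s','i','x'], ['6'])
  , (['s','e','v','e','n'], ['7']), (['e','i','g','h','t'], ['8']), (['n','i','n','e'], ['9']) ]

-- '[i for i in range(len(s)) if s.startswith(w, i)]'; s.startswith(w, i) with 0 ≤ i is exactly
-- 'w is a prefix of s[i:]', i.e. PySem.Chars.startswith (l.drop i.toNat) w
def wordStarts (l : List Char) (w : List Char) : List Int :=
  (PySem.List.pyRange 0 (l.length : Int) 1).filter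
    (fun i => PySem.Chars.startswith (l.drop i.toNat) w)

def transform_alt (d : Int) (s : String) : String :=
  let l := s.toList
  -- '[(i, c) for i, c in enumerate(s) if c.isdigit()]'
  let dHits := ((PySem.List.enumerate l 0).filter (fun p => PySem.Chars.isdigit p.2)).map
    (fun p => (p.1, [p.2]))
  -- 'for w, n in WORDS: hits.extend((i, n) for i in ...)'
  let hits := wordList.foldl
    (fun acc p => acc ++ (wordStarts l p.1).map (fun i => (i, p.2))) dHits
  -- 'hits.sort(key=lambda t: t[0])' then '"".join(v for _, v in hits)'
  String.mk (((PySem.List.sorted hits (fun t => t.1) false).map (fun t => t.2)).flatten)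

-- ===== PRECONDITION & SPEC =====
def Spec_transform (d : Int) (s : String) (out : String) : Prop := out = transform_alt d s
instance (d : Int) (s : String) (out : String) : Decidable (Spec_transform d s out) := by unfold Spec_transform; infer_instance

-- ===== CLAIM (what is proved, stated in full; the proofs are below) =====
def Claim_equal_transform : Prop := ∀ (d : Int) (s : String), Dom_transform d s → Spec_transform d s (transform d s)

-- ===== LEMMAS AND PROOFS =====

-- the token A and B emit at a position, read off the suffix starting there
def tok? (rest : List Char) : Option (List Char) :=
  match rest with
  | [] => none
  | c :: cs =>
    if PySem.Chars.isdigit c then some [c]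
    else (wordList.find? (fun p => p.1.isPrefixOf (c :: cs))).map (·.2)

-- the canonical hit list: one (index, token) pair per position carrying a token
def hitsGo (i : Int) (rest : List Char) : List (Int × List Char) :=
  match rest with
  | [] => []
  | c :: cs =>
    (match tok? (c :: cs) with
     | some v => [(i, v)]
     | none => []) ++ hitsGo (i + 1) cs

-- ---- A-side: dict lookup = association-list lookup; parse_word = first prefixing word ----
theorem wtn_mk : wordsToNumbers = PySem.Dict.mk wordList := by decide

theorem lookup_eq (t : List Char) :
    wordsToNumbers.get? t = (wordList.find? (fun p => p.1 == t)).map (·.2) := by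
  rw [wtn_mk]
  simp [wordList, PySem.Dict.get?, List.find?]

theorem lookup_some (t n : List Char) (h : wordsToNumbers.get? t = some n) :
    ∃ p ∈ wordList, p.1 = t ∧ p.2 = n := by
  rw [lookup_eq] at h
  rcases Option.map_eq_some_iff.mp h with ⟨p, hp, h2⟩
  exact ⟨p, List.mem_of_find?_eq_some hp,
    by simpa using List.find?_some hp, h2⟩

-- no word of the table is a (proper or improper) prefix of a different one
theorem words_prefix_free :
    ∀ p ∈ wordList, ∀ q ∈ wordList, p.1 <+: q.1 → p = q := by decide

theorem lookup_self : ∀ p ∈ wordList, wordsToNumbers.get? p.1 = some p.2 := by decide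

theorem words_ne_nil : ∀ p ∈ wordList, p.1 ≠ [] := by decide

-- no word of the table starts with a digit character
theorem words_head_not_digit :
    ∀ p ∈ wordList, PySem.Chars.isdigit p.1.headI = false := by decide

-- if no key of the dict is a prefix of the whole scanned string, parse_word's loop fails
theorem parseWordGo_none (cs : List Char) :
    ∀ temp, (∀ t n, wordsToNumbers.get? t = some n → ¬ t <+: temp ++ cs) →
      parseWordGo temp cs = none := by
  induction cs with
  | nil => intro temp _; rfl
  | cons c cs ih =>
    intro temp h
    unfold parseWordGo
    have hnone : wordsToNumbers.get? (temp ++ [c]) = none := by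
      cases hlk : wordsToNumbers.get? (temp ++ [c]) with
      | none => rfl
      | some n =>
        exact absurd (by simp : temp ++ [c] <+: temp ++ c :: cs) (h _ _ hlk)
    simp only [hnone]
    have := ih (temp ++ [c]) (by
      intro t n hlk hpre
      exact h t n hlk (by simpa using hpre))
    simpa using this

-- if temp ++ r is a key and no shorter extension of temp is, the loop returns its value
theorem parseWordGo_some (r : List Char) :
    ∀ temp rest n, r ≠ [] → wordsToNumbers.get? (temp ++ r) = some n →
      (∀ t m, wordsToNumbers.get? t = some m → temp <+: t → t <+: temp ++ r → t = temp ++ r) →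
      parseWordGo temp (r ++ rest) = some n := by
  induction r with
  | nil => intro _ _ _ h _ _; exact absurd rfl h
  | cons c r' ih =>
    intro temp rest n _ hlk hmin
    cases r' with
    | nil =>
      unfold parseWordGo
      simp [hlk]
    | cons c2 r'' =>
      have hne : temp ++ [c] ≠ temp ++ c :: c2 :: r'' := by simp
      have hnone : wordsToNumbers.get? (temp ++ [c]) = none := by
        cases hl : wordsToNumbers.get? (temp ++ [c]) with
        | none => rfl
        | some m =>
          exact absurd (hmin _ _ hl (by simp) (by simp)) hne
      have hpre : temp <+: temp ++ [c] := ⟨[c], rfl⟩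
      have hassoc : temp ++ c :: c2 :: r'' = (temp ++ [c]) ++ (c2 :: r'') := by simp
      have hrec := ih (temp ++ [c]) rest n (by simp)
        (hassoc ▸ hlk)
        (fun t m hl hp1 hp2 => by
          rw [← hassoc] at hp2 ⊢
          exact hmin t m hl (hpre.trans hp1) hp2)
      show parseWordGo temp ((c :: c2 :: r'') ++ rest) = some n
      unfold parseWordGo
      simp only [List.cons_append, hnone]
      exact hrec

-- the first word of the table prefixing l is the unique one, and find? returns it
theorem find_of_prefix (l : List Char) (p : List Char × List Char)
    (hp : p ∈ wordList) (hpre : p.1 <+: l) :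
    wordList.find? (fun q => q.1.isPrefixOf l) = some p := by
  cases hf : wordList.find? (fun q => q.1.isPrefixOf l) with
  | none =>
    have := List.find?_eq_none.mp hf p hp
    simp [List.isPrefixOf_iff_prefix] at this
    exact absurd hpre this
  | some q =>
    have hq := List.mem_of_find?_eq_some hf
    have hqp := List.find?_some hf
    simp only [List.isPrefixOf_iff_prefix] at hqp
    rcases List.prefix_or_prefix_of_prefix hqp hpre with h | h
    · rw [words_prefix_free q hq p hp h]
    · rw [(words_prefix_free p hp q hq h).symm]

-- the heart of the A side: parse_word on a suffix = first word of the table prefixing it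
theorem parse_eq (l : List Char) :
    parseWord l = (wordList.find? (fun p => p.1.isPrefixOf l)).map (·.2) := by
  by_cases hex : ∃ p ∈ wordList, p.1 <+: l
  · rcases hex with ⟨p, hp, hpre⟩
    have huniq : ∀ q ∈ wordList, q.1 <+: l → q = p := by
      intro q hq hqpre
      rcases List.prefix_or_prefix_of_prefix hqpre hpre with h | h
      · exact words_prefix_free q hq p hp h
      · exact (words_prefix_free p hp q hq h).symm
    have hfind := find_of_prefix l p hp hpre
    rcases hpre with ⟨rest, hrest⟩
    have := parseWordGo_some p.1 [] rest p.2 (words_ne_nil p hp)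
      (by simpa using lookup_self p hp)
      (by
        intro t m hl _ hp2
        rcases lookup_some t m hl with ⟨q, hq, hq1, _⟩
        simp only [List.nil_append] at hp2
        rw [← hq1] at hp2
        rw [← hq1, huniq q hq (hp2.trans ⟨rest, hrest⟩)]
        simp)
    unfold parseWord
    rw [hfind, ← hrest]
    simpa using this
  · simp only [not_exists, not_and] at hex
    have hfind : wordList.find? (fun p => p.1.isPrefixOf l) = none := by
      apply List.find?_eq_none.mpr
      intro p hp
      simp only [List.isPrefixOf_iff_prefix]
      exact hex p hp
    rw [hfind]
    unfold parseWord
    rw [parseWordGo_none l [] (by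
      intro t n hlk hpre
      rcases lookup_some t n hlk with ⟨q, hq, hq1, _⟩
      exact hex q hq (hq1 ▸ (by simpa using hpre)))]
    rfl

-- A's scan emits exactly the tokens of the canonical hit list, in order
theorem A_eq_hits (l : List Char) :
    ∀ acc i, transformGo acc l = acc ++ ((hitsGo i l).map (·.2)).flatten := by
  induction l with
  | nil => intro acc i; simp [transformGo, hitsGo]
  | cons c cs ih =>
    intro acc i
    unfold transformGo hitsGo tok?
    rw [parse_eq (c :: cs)]
    cases hf : wordList.find? (fun p => p.1.isPrefixOf (c :: cs)) with
    | none => simp only [Option.map_none, hf]; split_ifs <;> simp [ih _ (i + 1)]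
    | some p => simp only [Option.map_some, hf]; split_ifs <;> simp [ih _ (i + 1)]

-- ---- the canonical hit list: membership, ordering, no duplicates ----
theorem mem_hitsGo (l : List Char) :
    ∀ i p, p ∈ hitsGo i l ↔
      ∃ k : Nat, k < l.length ∧ p.1 = i + k ∧ tok? (l.drop k) = some p.2 := by
  induction l with
  | nil => intro i p; simp [hitsGo]
  | cons c cs ih =>
    intro i p
    unfold hitsGo
    constructor
    · intro h
      rcases List.mem_append.mp h with h | h
      · refine ⟨0, by simp, ?_, ?_⟩ <;>
        · cases htok : tok? (c :: cs) <;> rw [htok] at h <;> simp at h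
          · simp [h, htok]
      · rcases (ih (i + 1) p).mp h with ⟨k, hk, hp1, htok⟩
        exact ⟨k + 1, by simpa using hk, by omega, by simpa using htok⟩
    · rintro ⟨k, hk, hp1, htok⟩
      cases k with
      | zero =>
        apply List.mem_append.mpr; left
        simp only [List.drop_zero] at htok
        rw [htok]
        have : p = (i, p.2) := by
          cases p; simp at hp1 ⊢; omega
        rw [this]; simp
      | succ k' =>
        apply List.mem_append.mpr; right
        exact (ih (i + 1) p).mpr ⟨k', by simpa using hk, by omega, by simpa using htok⟩

theorem hitsGo_key_lb (l : List Char) :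
    ∀ i p, p ∈ hitsGo i l → i ≤ p.1 := by
  intro i p h
  rcases (mem_hitsGo l i p).mp h with ⟨k, _, hp1, _⟩
  omega

theorem hitsGo_pairwise (l : List Char) :
    ∀ i, (hitsGo i l).Pairwise (fun p q => p.1 < q.1) := by
  induction l with
  | nil => intro i; simp [hitsGo]
  | cons c cs ih =>
    intro i
    unfold hitsGo
    apply List.pairwise_append.mpr
    refine ⟨?_, ih (i + 1), ?_⟩
    · cases tok? (c :: cs) <;> simp
    · intro p hp q hq
      have h1 : p.1 = i := by
        cases htok : tok? (c :: cs) <;> rw [htok] at hp <;> simp at hp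
        · rw [hp]
      have := hitsGo_key_lb cs (i + 1) q hq
      omega

theorem hitsGo_nodup (l : List Char) (i : Int) : (hitsGo i l).Nodup := by
  have := hitsGo_pairwise l i
  exact this.imp (fun h heq => by subst heq; omega)

-- ---- B-side ----
theorem mem_wordStarts (l : List Char) (w : List Char) (i : Int) :
    i ∈ wordStarts l w ↔ 0 ≤ i ∧ i < l.length ∧ w <+: l.drop i.toNat := by
  unfold wordStarts
  rw [List.mem_filter, PySem.List.mem_pyRange_one]
  constructor
  · rintro ⟨⟨h0, h1⟩, h2⟩
    exact ⟨h0, h1, (PySem.Chars.startswith_iff _ _).mp h2⟩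
  · rintro ⟨h0, h1, h2⟩
    exact ⟨⟨h0, h1⟩, (PySem.Chars.startswith_iff _ _).mpr h2⟩

-- B's hit list, with the extend-loop unfolded to a flatMap
def bHits (l : List Char) : List (Int × List Char) :=
  (((PySem.List.enumerate l 0).filter (fun p => PySem.Chars.isdigit p.2)).map
    (fun p => (p.1, [p.2]))) ++
  wordList.flatMap (fun p => (wordStarts l p.1).map (fun i => (i, p.2)))

theorem mem_bHits (l : List Char) (p : Int × List Char) :
    p ∈ bHits l ↔
      (∃ k : Nat, ∃ h : k < l.length, PySem.Chars.isdigit l[k] ∧ p = ((k : Int), [l[k]])) ∨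
      (∃ q ∈ wordList, ∃ i : Int, 0 ≤ i ∧ i < l.length ∧ q.1 <+: l.drop i.toNat ∧ p = (i, q.2)) := by
  unfold bHits
  rw [List.mem_append]
  constructor
  · intro h
    rcases h with h | h
    · left
      rcases List.mem_map.mp h with ⟨q, hq, hpq⟩
      rcases List.mem_filter.mp hq with ⟨hqe, hqd⟩
      rcases (PySem.List.mem_enumerate_iff _ _ _).mp hqe with ⟨k, hk, hqk⟩
      subst hqk
      exact ⟨k, hk, by simpa using hqd, by simpa using hpq.symm⟩
    · right
      rcases List.mem_flatMap.mp h with ⟨q, hq, hpq⟩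
      rcases List.mem_map.mp hpq with ⟨i, hi, hip⟩
      rcases (mem_wordStarts l q.1 i).mp hi with ⟨h0, h1, h2⟩
      exact ⟨q, hq, i, h0, h1, h2, hip.symm⟩
  · intro h
    rcases h with ⟨k, hk, hd, hp⟩ | ⟨q, hq, i, h0, h1, h2, hp⟩
    · left
      apply List.mem_map.mpr
      refine ⟨((k : Int), l[k]), List.mem_filter.mpr ⟨?_, by simpa using hd⟩, by simp [hp]⟩
      exact (PySem.List.mem_enumerate_iff _ _ _).mpr ⟨k, hk, by simp⟩
    · right
      apply List.mem_flatMap.mpr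
      refine ⟨q, hq, List.mem_map.mpr ⟨i, (mem_wordStarts l q.1 i).mpr ⟨h0, h1, h2⟩, hp.symm⟩⟩

-- B's fold is exactly bHits
theorem fold_eq_bHits (l : List Char) :
    wordList.foldl (fun acc p => acc ++ (wordStarts l p.1).map (fun i => (i, p.2)))
      (((PySem.List.enumerate l 0).filter (fun p => PySem.Chars.isdigit p.2)).map
        (fun p => (p.1, [p.2]))) = bHits l := by
  rw [PySem.List.foldl_append_eq_flatMap]
  rfl

-- drop at an in-range position is getElem-cons
theorem drop_cons_at (l : List Char) (k : Nat) (hk : k < l.length) :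
    l.drop k = l[k] :: l.drop (k + 1) :=
  (List.getElem_cons_drop hk).symm

-- a table word never starts with a digit character, so a word match excludes a digit match
theorem head_not_digit_of_word_prefix (q : List Char × List Char) (hq : q ∈ wordList)
    (c : Char) (cs : List Char) (h : q.1 <+: c :: cs) :
    PySem.Chars.isdigit c = false := by
  have hne := words_ne_nil q hq
  have hh := words_head_not_digit q hq
  rcases q with ⟨w, n⟩
  cases w with
  | nil => exact absurd rfl hne
  | cons a as =>
    rcases h with ⟨t, ht⟩
    have hac : a = c := by simpa using congrArg List.headI ht
    simpa [hac] using hh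

-- membership in B's hit list = membership in the canonical hit list (at offset 0)
theorem mem_bHits_iff_hitsGo (l : List Char) (p : Int × List Char) :
    p ∈ bHits l ↔ p ∈ hitsGo 0 l := by
  rw [mem_bHits, mem_hitsGo]
  constructor
  · intro h
    rcases h with ⟨k, hk, hd, hp⟩ | ⟨q, hq, i, h0, h1, h2, hp⟩
    · refine ⟨k, hk, by simp [hp], ?_⟩
      rw [drop_cons_at l k hk]
      simp [tok?, hd, hp]
    · have hk : i.toNat < l.length := by omega
      have hdc := drop_cons_at l i.toNat hk
      have hnd : PySem.Chars.isdigit l[i.toNat] = false :=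
        head_not_digit_of_word_prefix q hq l[i.toNat] _ (hdc ▸ h2)
      refine ⟨i.toNat, hk, by simp [hp]; omega, ?_⟩
      rw [hdc]
      simp only [tok?]
      rw [if_neg (by simp [hnd])]
      rw [← hdc, find_of_prefix _ q hq h2]
      simp [hp]
  · rintro ⟨k, hk, hp1, htok⟩
    rw [drop_cons_at l k hk] at htok
    simp only [tok?] at htok
    by_cases hd : PySem.Chars.isdigit l[k]
    · left
      rw [if_pos hd] at htok
      refine ⟨k, hk, hd, ?_⟩
      cases p
      simp at hp1 htok ⊢
      exact ⟨by omega, htok.symm⟩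
    · right
      rw [if_neg hd] at htok
      rcases Option.map_eq_some_iff.mp htok with ⟨q, hfq, hq2⟩
      have hqm := List.mem_of_find?_eq_some hfq
      have hqp := List.find?_some hfq
      simp only [List.isPrefixOf_iff_prefix] at hqp
      refine ⟨q, hqm, (k : Int), by omega, by omega, ?_, ?_⟩
      · rw [Int.toNat_natCast, drop_cons_at l k hk]
        exact hqp
      · cases p; simp at hp1 hq2 ⊢; exact ⟨by omega, hq2.symm⟩

-- B's hit list has no duplicates
theorem bHits_nodup (l : List Char) : (bHits l).Nodup := by
  unfold bHits
  rw [List.nodup_append]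
  refine ⟨?_, ?_, ?_⟩
  · -- digit hits: keys strictly increase
    have h1 : ((PySem.List.enumerate l 0).filter
        (fun p => PySem.Chars.isdigit p.2)).Pairwise (fun p q => p.1 < q.1) :=
      (PySem.List.pairwise_lt_enumerate l 0).filter _
    have h2 : (((PySem.List.enumerate l 0).filter (fun p => PySem.Chars.isdigit p.2)).map
        (fun p => (p.1, [p.2]))).Pairwise (fun p q : Int × List Char => p.1 < q.1) :=
      List.Pairwise.map (fun p : Int × Char => (p.1, [p.2])) (fun _ _ h => h) h1
    exact h2.imp (fun h heq => by subst heq; omega)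
  · -- word hits: each block nodup, blocks pairwise disjoint
    rw [List.nodup_flatMap]
    constructor
    · intro q hq
      apply List.Nodup.map
      · intro a b hab; simpa using congrArg Prod.fst hab
      · exact (PySem.List.nodup_pyRange_one _ _).filter _
    · have hnd : wordList.Nodup := by decide
      apply hnd.pairwise_of_forall_ne
      intro p hp q hq hpq
      simp only [Function.onFun, List.disjoint_left]
      intro a hap haq
      rcases List.mem_map.mp hap with ⟨i, hi, hia⟩
      rcases List.mem_map.mp haq with ⟨j, hj, hja⟩
      have hij : i = j := by
        have := congrArg Prod.fst (hia.trans hja.symm)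
        simpa using this
      subst hij
      rcases (mem_wordStarts l p.1 i).mp hi with ⟨_, _, hpre1⟩
      rcases (mem_wordStarts l q.1 i).mp hj with ⟨_, _, hpre2⟩
      rcases List.prefix_or_prefix_of_prefix hpre1 hpre2 with h | h
      · exact hpq (words_prefix_free p hp q hq h)
      · exact hpq ((words_prefix_free q hq p hp h).symm)
  · -- a digit position is never a word start
    intro a ha b hb heq
    rcases List.mem_map.mp ha with ⟨q, hq, hqa⟩
    rcases List.mem_filter.mp hq with ⟨hqe, hqd⟩
    rcases (PySem.List.mem_enumerate_iff _ _ _).mp hqe with ⟨k, hk, hqk⟩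
    rcases List.mem_flatMap.mp hb with ⟨w, hw, hwa⟩
    rcases List.mem_map.mp hwa with ⟨i, hi, hib⟩
    rcases (mem_wordStarts l w.1 i).mp hi with ⟨h0, h1, hpre⟩
    have hik : i = (k : Int) := by
      have := congrArg Prod.fst (hib.trans (heq.symm.trans hqa.symm))
      subst hqk; simpa using this
    subst hik
    have hkt : ((k : Int)).toNat = k := by omega
    rw [hkt, drop_cons_at l k hk] at hpre
    have hnd := head_not_digit_of_word_prefix w hw l[k] _ hpre
    subst hqk
    simp only [hnd] at hqd
    simp at hqd

-- sorting B's hits by position yields exactly the canonical hit list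
theorem sorted_bHits (l : List Char) :
    PySem.List.sorted (bHits l) (fun t => t.1) false = hitsGo 0 l := by
  apply PySem.List.sorted_eq_of_perm_of_pairwise_lt
  · exact ((List.perm_ext_iff_of_nodup (bHits_nodup l) (hitsGo_nodup l 0)).mpr
      (fun p => mem_bHits_iff_hitsGo l p)).symm
  · exact hitsGo_pairwise l 0

-- ===== VERDICT (by name: the statement is the Claim_ definition above) =====
theorem transform_spec : Claim_equal_transform := by
  intro d s _
  simp only [Spec_transform, transform, transform_alt]
  rw [A_eq_hits s.toList [] 0, fold_eq_bHits, sorted_bHits, List.nil_append]
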